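-- pv_equiv track=rewrite | github.com/Secrettestbot/Super-board-game-game | games/cartographers.py | shape_variants
-- ===== SOURCE A (Python) =====
-- def rotate_shape(cells, times=1):
--     """Rotate shape cells 90 degrees clockwise, times number of rotations."""
--     result = list(cells)
--     for _ in range(times % 4):
--         result = [(c, -r) for r, c in result]
--         # Normalize to top-left origin
--         min_r = min(r for r, c in result)
--         min_c = min(c for r, c in result)
--         result = [(r - min_r, c - min_c) for r, c in result]
--     return result
--
-- def flip_shape(cells):
--     """Flip shape cells horizontally."""
--     max_c = max(c for r, c in cells)
--     result = [(r, max_c - c) for r, c in cells]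
--     min_r = min(r for r, c in result)
--     min_c = min(c for r, c in result)
--     result = [(r - min_r, c - min_c) for r, c in result]
--     return result
--
-- def shape_variants(cells):
--     """Get all unique rotations and flips of a shape."""
--     variants = []
--     seen = set()
--     for do_flip in [False, True]:
--         base = flip_shape(cells) if do_flip else list(cells)
--         for rot in range(4):
--             variant = rotate_shape(base, rot)
--             variant_sorted = tuple(sorted(variant))
--             if variant_sorted not in seen:
--                 seen.add(variant_sorted)
--                 variants.append(variant)
--     return variants
-- ===== SOURCE B (Python) =====
-- def shape_variants(cells):
--     """Get all unique rotations and flips of a shape.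
--
--     Closed-form D4 symmetries: the identity variant is the input itself;
--     the other seven are coordinate transforms normalized to top-left origin.
--     """
--     def norm(pts):
--         min_r = min(r for r, c in pts)
--         min_c = min(c for r, c in pts)
--         return [(r - min_r, c - min_c) for r, c in pts]
--
--     # rot90, rot180, rot270, flip, flip+rot90, flip+rot180, flip+rot270
--     transforms = [
--         lambda r, c: (c, -r),
--         lambda r, c: (-r, -c),
--         lambda r, c: (-c, r),
--         lambda r, c: (r, -c),
--         lambda r, c: (-c, -r),
--         lambda r, c: (-r, c),
--         lambda r, c: (c, r),
--     ]
--
--     variants = []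
--     seen = set()
--
--     def emit(variant):
--         key = tuple(sorted(variant))
--         if key not in seen:
--             seen.add(key)
--             variants.append(variant)
--
--     emit(list(cells))
--     for t in transforms:
--         emit(norm([t(r, c) for r, c in cells]))
--     return variants
-- ===== Notes on version B (the rewrite author's own statement) =====
-- stated objective: simpler
-- what changed: B replaces A's iterated rotate-90-and-renormalize loop (and the max-based flip helper) by the eight D4 symmetries written as explicit closed-form coordinate transforms, each applied in one map and normalized once; dedup by sorted-tuple key in insertion order is kept.
import Mathlib
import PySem

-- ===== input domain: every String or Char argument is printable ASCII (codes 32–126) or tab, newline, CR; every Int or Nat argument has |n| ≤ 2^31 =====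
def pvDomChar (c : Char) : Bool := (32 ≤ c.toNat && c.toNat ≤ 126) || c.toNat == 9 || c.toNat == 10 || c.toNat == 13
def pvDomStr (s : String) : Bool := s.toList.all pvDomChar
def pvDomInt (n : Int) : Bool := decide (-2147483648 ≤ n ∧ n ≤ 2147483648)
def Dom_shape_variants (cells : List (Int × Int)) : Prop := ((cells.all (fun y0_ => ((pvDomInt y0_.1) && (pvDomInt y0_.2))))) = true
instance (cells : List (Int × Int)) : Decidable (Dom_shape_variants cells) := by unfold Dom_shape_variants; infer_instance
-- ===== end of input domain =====

-- B replaces A's iterated rotate-and-renormalize with the eight D4 symmetries as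
-- closed-form coordinate transforms, each normalized once (objective: simpler).

-- ===== PORT A =====
-- min()/max() over a generator → PySem.List.min?/max?; the '.getD 0' branch is reached
-- only on the empty list, where Python raises ValueError (excluded by Pre_shape_variants).
def rotate_shape (cells : List (Int × Int)) (times : Int) : List (Int × Int) :=
  (PySem.List.pyRange 0 (PySem.Int.mod times 4) 1).foldl
    (fun result _ =>
      let result := result.map (fun p => (p.2, -p.1))
      let min_r := (PySem.List.min? (result.map Prod.fst) (fun x => x)).getD 0
      let min_c := (PySem.List.min? (result.map Prod.snd) (fun x => x)).getD 0
      result.map (fun p => (p.1 - min_r, p.2 - min_c)))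
    cells

def flip_shape (cells : List (Int × Int)) : List (Int × Int) :=
  let max_c := (PySem.List.max? (cells.map Prod.snd) (fun x => x)).getD 0
  let result := cells.map (fun p => (p.1, max_c - p.2))
  let min_r := (PySem.List.min? (result.map Prod.fst) (fun x => x)).getD 0
  let min_c := (PySem.List.min? (result.map Prod.snd) (fun x => x)).getD 0
  result.map (fun p => (p.1 - min_r, p.2 - min_c))

def shape_variants (cells : List (Int × Int)) : List (List (Int × Int)) :=
  (([false, true]).foldl
    (fun st do_flip =>
      let base := if do_flip then flip_shape cells else cells
      (PySem.List.pyRange 0 4 1).foldl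
        (fun st rot =>
          let variant := rotate_shape base rot
          let variant_sorted := PySem.List.sorted2 variant Prod.fst Prod.snd
          if PySem.Set.contains st.2 variant_sorted then st
          else (st.1 ++ [variant], PySem.Set.add st.2 variant_sorted))
        st)
    (([] : List (List (Int × Int))), (PySem.Set.empty : PySem.Set (List (Int × Int))))).1

-- ===== PORT B =====
def bNorm (pts : List (Int × Int)) : List (Int × Int) :=
  let min_r := (PySem.List.min? (pts.map Prod.fst) (fun x => x)).getD 0
  let min_c := (PySem.List.min? (pts.map Prod.snd) (fun x => x)).getD 0
  pts.map (fun p => (p.1 - min_r, p.2 - min_c))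

-- rot90, rot180, rot270, flip, flip+rot90, flip+rot180, flip+rot270
def bTransforms : List ((Int × Int) → (Int × Int)) :=
  [ fun p => (p.2, -p.1), fun p => (-p.1, -p.2), fun p => (-p.2, p.1),
    fun p => (p.1, -p.2), fun p => (-p.2, -p.1), fun p => (-p.1, p.2),
    fun p => (p.2, p.1) ]

def bEmit (st : List (List (Int × Int)) × PySem.Set (List (Int × Int)))
    (variant : List (Int × Int)) :
    List (List (Int × Int)) × PySem.Set (List (Int × Int)) :=
  let key := PySem.List.sorted2 variant Prod.fst Prod.snd
  if PySem.Set.contains st.2 key then st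
  else (st.1 ++ [variant], PySem.Set.add st.2 key)

def shape_variants_alt (cells : List (Int × Int)) : List (List (Int × Int)) :=
  (bTransforms.foldl
    (fun st t => bEmit st (bNorm (cells.map (fun p => t p))))
    (bEmit (([] : List (List (Int × Int))),
            (PySem.Set.empty : PySem.Set (List (Int × Int)))) cells)).1

-- ===== PRECONDITION & SPEC =====
-- Pre_ excludes only the empty list, on which Python's min()/max() raise ValueError.
def Pre_shape_variants (cells : List (Int × Int)) : Prop := cells ≠ []
instance (cells : List (Int × Int)) : Decidable (Pre_shape_variants cells) := by
  unfold Pre_shape_variants; infer_instance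

def pvWitness_shape_variants : (List (Int × Int)) := [(0, 0), (0, 1)]

def Spec_shape_variants (cells : List (Int × Int)) (out : List (List (Int × Int))) : Prop := out = shape_variants_alt cells
instance (cells : List (Int × Int)) (out : List (List (Int × Int))) : Decidable (Spec_shape_variants cells out) := by unfold Spec_shape_variants; infer_instance

-- ===== CLAIM (what is proved, stated in full; the proofs are below) =====
def Claim_equal_shape_variants : Prop := ∀ (cells : List (Int × Int)), Dom_shape_variants cells → Pre_shape_variants cells → Spec_shape_variants cells (shape_variants cells)

-- ===== LEMMAS AND PROOFS =====

-- min of a list shifted by a constant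
lemma foldl_min_shift (t : List Int) (y a : Int) :
    (t.map (fun v => v + a)).foldl min (y + a) = t.foldl min y + a := by
  induction t generalizing y with
  | nil => rfl
  | cons x t ih =>
    simp only [List.map_cons, List.foldl_cons]
    have hmin : min (y + a) (x + a) = min y x + a := by omega
    rw [hmin]
    exact ih (min y x)

lemma min_getD_shift (ys : List Int) (h : ys ≠ []) (a : Int) :
    (PySem.List.min? (ys.map (fun v => v + a)) (fun x => x)).getD 0
      = (PySem.List.min? ys (fun x => x)).getD 0 + a := by
  cases ys with
  | nil => exact absurd rfl h
  | cons y t =>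
    simp only [List.map_cons, PySem.List.min?_id_cons, Option.getD_some]
    exact foldl_min_shift t y a

-- normalization is invariant under translating all cells by a fixed offset
lemma bNorm_shift (ys : List (Int × Int)) (h : ys ≠ []) (a b : Int) :
    bNorm (ys.map (fun p => (p.1 + a, p.2 + b))) = bNorm ys := by
  have hf : (ys.map (fun p => (p.1 + a, p.2 + b))).map Prod.fst
      = (ys.map Prod.fst).map (fun v => v + a) := by
    rw [List.map_map, List.map_map]; rfl
  have hs : (ys.map (fun p => (p.1 + a, p.2 + b))).map Prod.snd
      = (ys.map Prod.snd).map (fun v => v + b) := by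
    rw [List.map_map, List.map_map]; rfl
  have hf' : ys.map Prod.fst ≠ [] := by simpa using h
  have hs' : ys.map Prod.snd ≠ [] := by simpa using h
  unfold bNorm
  rw [hf, hs, min_getD_shift _ hf' a, min_getD_shift _ hs' b, List.map_map]
  apply List.map_congr_left
  intro p _
  simp only [Function.comp_apply, Prod.mk.injEq]
  omega

lemma bNorm_ne_nil (ys : List (Int × Int)) (h : ys ≠ []) : bNorm ys ≠ [] := by
  simpa [bNorm] using h

-- applying a linear transform after normalization, then renormalizing,
-- equals transforming and normalizing once (the transform turns the
-- normalization shift into another shift, which bNorm_shift absorbs)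
lemma bNorm_map_bNorm (f : (Int × Int) → (Int × Int)) (u v : Int → Int → Int)
    (hf : ∀ (p : Int × Int) (a b : Int),
      f (p.1 - a, p.2 - b) = ((f p).1 + u a b, (f p).2 + v a b))
    (ys : List (Int × Int)) (h : ys ≠ []) :
    bNorm ((bNorm ys).map f) = bNorm (ys.map f) := by
  set mr := (PySem.List.min? (ys.map Prod.fst) (fun x => x)).getD 0 with hmr
  set mc := (PySem.List.min? (ys.map Prod.snd) (fun x => x)).getD 0 with hmc
  have h1 : (bNorm ys).map f
      = (ys.map f).map (fun q => (q.1 + u mr mc, q.2 + v mr mc)) := by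
    unfold bNorm
    rw [← hmr, ← hmc, List.map_map, List.map_map]
    apply List.map_congr_left
    intro p _
    simpa using hf p mr mc
  have hne : ys.map f ≠ [] := by simpa using h
  rw [h1, bNorm_shift _ hne]

lemma rotate_zero (xs : List (Int × Int)) : rotate_shape xs 0 = xs := rfl

lemma rotate_one (xs : List (Int × Int)) :
    rotate_shape xs 1 = bNorm (xs.map (fun p => (p.2, -p.1))) := by
  have hr : PySem.List.pyRange 0 (PySem.Int.mod 1 4) 1 = [0] := by decide
  simp only [rotate_shape, hr, List.foldl_cons, List.foldl_nil]
  rfl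

lemma rotate_two_steps (xs : List (Int × Int)) :
    rotate_shape xs 2 = rotate_shape (rotate_shape xs 1) 1 := by
  have hr2 : PySem.List.pyRange 0 (PySem.Int.mod 2 4) 1 = [0, 1] := by decide
  have hr1 : PySem.List.pyRange 0 (PySem.Int.mod 1 4) 1 = [0] := by decide
  simp only [rotate_shape, hr2, hr1, List.foldl_cons, List.foldl_nil]

lemma rotate_three_steps (xs : List (Int × Int)) :
    rotate_shape xs 3 = rotate_shape (rotate_shape xs 2) 1 := by
  have hr3 : PySem.List.pyRange 0 (PySem.Int.mod 3 4) 1 = [0, 1, 2] := by decide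
  have hr2 : PySem.List.pyRange 0 (PySem.Int.mod 2 4) 1 = [0, 1] := by decide
  have hr1 : PySem.List.pyRange 0 (PySem.Int.mod 1 4) 1 = [0] := by decide
  simp only [rotate_shape, hr3, hr2, hr1, List.foldl_cons, List.foldl_nil]

lemma bNorm_rot (ys : List (Int × Int)) (h : ys ≠ []) :
    bNorm ((bNorm ys).map (fun p => (p.2, -p.1)))
      = bNorm (ys.map (fun p => (p.2, -p.1))) := by
  apply bNorm_map_bNorm _ (fun a b => -b) (fun a b => a) _ _ h
  intro p a b
  simp only [Prod.mk.injEq]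
  omega

lemma rotate_two (xs : List (Int × Int)) (h : xs ≠ []) :
    rotate_shape xs 2 = bNorm (xs.map (fun p => (-p.1, -p.2))) := by
  have h1 : xs.map (fun p => ((p.2 : Int), -p.1)) ≠ [] := by simpa using h
  rw [rotate_two_steps, rotate_one, rotate_one, bNorm_rot _ h1, List.map_map]
  congr 1

lemma rotate_three (xs : List (Int × Int)) (h : xs ≠ []) :
    rotate_shape xs 3 = bNorm (xs.map (fun p => (-p.2, p.1))) := by
  have h2 : xs.map (fun p => ((-p.1 : Int), -p.2)) ≠ [] := by simpa using h
  rw [rotate_three_steps, rotate_two _ h, rotate_one, bNorm_rot _ h2, List.map_map]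
  congr 1
  apply List.map_congr_left
  intro p _
  simp

lemma flip_eq (xs : List (Int × Int)) (h : xs ≠ []) :
    flip_shape xs = bNorm (xs.map (fun p => (p.1, -p.2))) := by
  set mx := (PySem.List.max? (xs.map Prod.snd) (fun x => x)).getD 0 with hmx
  have h1 : xs.map (fun p => (p.1, mx - p.2))
      = (xs.map (fun p => (p.1, -p.2))).map (fun q => (q.1 + 0, q.2 + mx)) := by
    rw [List.map_map]
    apply List.map_congr_left
    intro p _
    simp only [Function.comp_apply, Prod.mk.injEq]
    omega
  have hne : xs.map (fun p => ((p.1 : Int), -p.2)) ≠ [] := by simpa using h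
  show bNorm (xs.map (fun p => (p.1, mx - p.2))) = _
  rw [h1, bNorm_shift _ hne]

-- the three rotations of the flipped base, as closed-form transforms
lemma flip_rot_one (xs : List (Int × Int)) (h : xs ≠ []) :
    rotate_shape (flip_shape xs) 1 = bNorm (xs.map (fun p => (-p.2, -p.1))) := by
  have hne : xs.map (fun p => ((p.1 : Int), -p.2)) ≠ [] := by simpa using h
  rw [flip_eq _ h, rotate_one, bNorm_rot _ hne, List.map_map]
  congr 1

lemma flip_rot_two (xs : List (Int × Int)) (h : xs ≠ []) :
    rotate_shape (flip_shape xs) 2 = bNorm (xs.map (fun p => (-p.1, p.2))) := by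
  have hne : xs.map (fun p => ((p.1 : Int), -p.2)) ≠ [] := by simpa using h
  have hb := bNorm_ne_nil _ hne
  rw [flip_eq _ h, rotate_two _ hb]
  have habs : bNorm ((bNorm (xs.map (fun p => (p.1, -p.2)))).map (fun p => (-p.1, -p.2)))
      = bNorm ((xs.map (fun p => ((p.1 : Int), -p.2))).map (fun p => (-p.1, -p.2))) := by
    apply bNorm_map_bNorm _ (fun a b => a) (fun a b => b) _ _ hne
    intro p a b
    simp only [Prod.mk.injEq]
    omega
  rw [habs, List.map_map]
  congr 1
  apply List.map_congr_left
  intro p _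
  simp

lemma flip_rot_three (xs : List (Int × Int)) (h : xs ≠ []) :
    rotate_shape (flip_shape xs) 3 = bNorm (xs.map (fun p => (p.2, p.1))) := by
  have hne : xs.map (fun p => ((p.1 : Int), -p.2)) ≠ [] := by simpa using h
  have hb := bNorm_ne_nil _ hne
  rw [flip_eq _ h, rotate_three _ hb]
  have habs : bNorm ((bNorm (xs.map (fun p => (p.1, -p.2)))).map (fun p => (-p.2, p.1)))
      = bNorm ((xs.map (fun p => ((p.1 : Int), -p.2))).map (fun p => (-p.2, p.1))) := by
    apply bNorm_map_bNorm _ (fun a b => b) (fun a b => -a) _ _ hne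
    intro p a b
    simp only [Prod.mk.injEq]
    omega
  rw [habs, List.map_map]
  congr 1
  apply List.map_congr_left
  intro p _
  simp

-- ===== VERDICT (by name: the statement is the Claim_ definition above) =====
theorem shape_variants_spec : Claim_equal_shape_variants := by
  intro cells _ hpre
  unfold Spec_shape_variants
  have hr4 : PySem.List.pyRange 0 4 1 = [(0:Int), 1, 2, 3] := by decide
  have hA : shape_variants cells =
      (([false, true]).foldl
        (fun st do_flip =>
          (PySem.List.pyRange 0 4 1).foldl
            (fun st rot =>
              bEmit st (rotate_shape (if do_flip then flip_shape cells else cells) rot))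
            st)
        (([] : List (List (Int × Int))),
         (PySem.Set.empty : PySem.Set (List (Int × Int))))).1 := rfl
  rw [hA]
  simp only [hr4, List.foldl_cons, List.foldl_nil, Bool.false_eq_true, if_false, if_true,
    shape_variants_alt, bTransforms]
  rw [flip_rot_one _ hpre, flip_rot_two _ hpre, flip_rot_three _ hpre,
    rotate_zero, rotate_one, rotate_two _ hpre, rotate_three _ hpre,
    flip_eq _ hpre, rotate_zero]
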